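-- pv_equiv track=rewrite | github.com/sevvanthits2025aids-alt/data-science-team | main.py | calculate_disease_score
-- ===== SOURCE A (Python) =====
-- from typing import Any, Dict, List, Optional, Tuple
--
-- def calculate_disease_score(user_symptoms: List[str], disease_symptoms: set, critical_symptom_weights: dict) -> int:
--     """Calculate weighted confidence score for disease matching."""
--     regular_matches = len(set(user_symptoms) & disease_symptoms)
--
--     # Weight critical symptoms higher
--     weighted_score = 0
--     for symptom in user_symptoms:
--         if symptom in disease_symptoms:
--             weight = critical_symptom_weights.get(symptom, 1)
--             weighted_score += weight
--
--     return weighted_score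
-- ===== SOURCE B (Python) =====
-- def calculate_disease_score(user_symptoms, disease_symptoms, critical_symptom_weights):
--     """Calculate weighted confidence score for disease matching.
--
--     Inverted traversal: tally the user's symptom occurrences once, then loop
--     over the disease's symptom set and add occurrences * weight per disease
--     symptom.  Order-independent since the result is a sum."""
--     occ = {}
--     for symptom in user_symptoms:
--         occ[symptom] = occ.get(symptom, 0) + 1
--     score = 0
--     for symptom in disease_symptoms:
--         if symptom in occ:
--             score += occ[symptom] * critical_symptom_weights.get(symptom, 1)
--     return score
-- ===== Notes on version B (the rewrite author's own statement) =====
-- stated objective: alternative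
-- what changed: Inverts the traversal: B tallies user symptom occurrences into a dict once, then loops over the disease symptom set adding occurrences * weight per disease symptom, instead of A's per-occurrence membership scan of the user list (and drops the dead regular_matches intersection).
import Mathlib
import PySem

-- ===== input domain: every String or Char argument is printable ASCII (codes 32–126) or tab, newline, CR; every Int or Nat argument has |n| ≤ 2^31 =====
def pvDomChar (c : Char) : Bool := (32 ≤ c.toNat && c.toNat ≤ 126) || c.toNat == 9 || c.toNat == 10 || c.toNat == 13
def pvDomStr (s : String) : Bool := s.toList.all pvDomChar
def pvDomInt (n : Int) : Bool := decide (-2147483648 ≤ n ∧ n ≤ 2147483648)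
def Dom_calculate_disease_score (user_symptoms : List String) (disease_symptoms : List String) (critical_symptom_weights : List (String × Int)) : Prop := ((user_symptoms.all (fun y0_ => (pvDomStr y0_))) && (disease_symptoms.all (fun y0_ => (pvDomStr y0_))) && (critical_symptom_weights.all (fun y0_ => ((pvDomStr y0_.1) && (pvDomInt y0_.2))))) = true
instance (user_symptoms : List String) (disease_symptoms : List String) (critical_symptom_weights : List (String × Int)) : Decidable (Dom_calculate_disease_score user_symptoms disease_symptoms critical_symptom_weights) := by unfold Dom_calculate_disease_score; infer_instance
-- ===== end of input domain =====

-- B inverts the traversal: it loops over the disease's symptom set and adds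
-- count(user occurrences) * weight per disease symptom, instead of A's scan of
-- the user list with a per-occurrence membership test; an alternative of similar cost.


-- ===== PORT A =====
-- literal transliteration of A: compute the (dead) regular_matches intersection,
-- then sum the weight of every occurrence of a matching user symptom
def calculate_disease_score (user_symptoms : List String) (disease_symptoms : List String) (critical_symptom_weights : List (String × Int)) : Int :=
  let _regular_matches :=
    (PySem.Set.inter (PySem.Set.ofList user_symptoms) disease_symptoms).length
  let wd := PySem.Dict.ofList critical_symptom_weights
  user_symptoms.foldl
    (fun weighted_score symptom =>
      if disease_symptoms.contains symptom then
        weighted_score + wd.getD symptom 1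
      else weighted_score) 0

-- ===== PORT B =====
-- literal transliteration of B: occ = {}; for s in user_symptoms: occ[s] = occ.get(s,0)+1;
-- then for symptom in disease_symptoms: if symptom in occ: score += occ[symptom] * weights.get(symptom, 1)
-- (occ[symptom] is ported as getD with default 0, exact here since it sits under 'symptom in occ')
def calculate_disease_score_alt (user_symptoms : List String) (disease_symptoms : List String) (critical_symptom_weights : List (String × Int)) : Int :=
  let occ := user_symptoms.foldl
    (fun d symptom => d.insert symptom (d.getD symptom 0 + 1)) PySem.Dict.empty
  disease_symptoms.foldl
    (fun score symptom =>
      if occ.contains symptom then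
        score + occ.getD symptom 0 * (PySem.Dict.ofList critical_symptom_weights).getD symptom 1
      else score) 0

-- ===== PRECONDITION & SPEC =====
-- disease_symptoms is a Python SET: a list encoding with duplicate elements
-- represents no set (and A raises TypeError on any non-set argument), so Pre_
-- restricts that argument to duplicate-free lists.
def Pre_calculate_disease_score (user_symptoms : List String) (disease_symptoms : List String) (critical_symptom_weights : List (String × Int)) : Prop := disease_symptoms.Nodup
instance (user_symptoms : List String) (disease_symptoms : List String) (critical_symptom_weights : List (String × Int)) : Decidable (Pre_calculate_disease_score user_symptoms disease_symptoms critical_symptom_weights) := by unfold Pre_calculate_disease_score; infer_instance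
def pvWitness_calculate_disease_score : List String × List String × (List (String × Int)) := (["fever", "cough", "fever"], ["fever", "rash"], [("fever", 3)])

def Spec_calculate_disease_score (user_symptoms : List String) (disease_symptoms : List String) (critical_symptom_weights : List (String × Int)) (out : Int) : Prop := out = calculate_disease_score_alt user_symptoms disease_symptoms critical_symptom_weights
instance (user_symptoms : List String) (disease_symptoms : List String) (critical_symptom_weights : List (String × Int)) (out : Int) : Decidable (Spec_calculate_disease_score user_symptoms disease_symptoms critical_symptom_weights out) := by unfold Spec_calculate_disease_score; infer_instance

-- ===== CLAIM (what is proved, stated in full; the proofs are below) =====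
def Claim_equal_calculate_disease_score : Prop := ∀ (user_symptoms : List String) (disease_symptoms : List String) (critical_symptom_weights : List (String × Int)), Dom_calculate_disease_score user_symptoms disease_symptoms critical_symptom_weights → Pre_calculate_disease_score user_symptoms disease_symptoms critical_symptom_weights → Spec_calculate_disease_score user_symptoms disease_symptoms critical_symptom_weights (calculate_disease_score user_symptoms disease_symptoms critical_symptom_weights)

-- ===== LEMMAS AND PROOFS =====

-- indicator sum over a duplicate-free list
lemma sum_indicator_of_nodup (ds : List String) (hnd : ds.Nodup) (x : String) (c : Int) :
    (ds.map (fun d => if d = x then c else 0)).sum = if x ∈ ds then c else 0 := by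
  induction ds with
  | nil => simp
  | cons a t ih =>
    rcases List.nodup_cons.mp hnd with ⟨hat, hnt⟩
    by_cases h : a = x
    · subst h
      have hz : (t.map (fun d => if d = a then c else 0)).sum = 0 := by
        apply List.sum_eq_zero
        intro y hy
        rcases List.mem_map.mp hy with ⟨d, hd, rfl⟩
        have : d ≠ a := fun e => hat (e ▸ hd)
        simp [this]
      simp [hz]
    · have hxa : x ≠ a := fun e => h e.symm
      simp [h, hxa, ih hnt]

-- regrouping: summing count(us, d) * g d over the distinct disease symptoms
-- equals summing (if s ∈ ds then g s else 0) over the user occurrences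
lemma count_mul_sum (ds : List String) (hnd : ds.Nodup) (us : List String) (g : String → Int) :
    (ds.map (fun d => ((us.count d : Int)) * g d)).sum
      = (us.map (fun s => if s ∈ ds then g s else 0)).sum := by
  induction us with
  | nil => simp
  | cons x t ih =>
    have hsplit : ds.map (fun d => (((x :: t).count d : Int)) * g d)
        = ds.map (fun d => ((t.count d : Int)) * g d + (if d = x then g x else 0)) := by
      apply List.map_congr_left
      intro d _
      by_cases h : d = x
      · subst h
        simp [List.count_cons_self]
        push_cast
        ring
      · simp [List.count_cons, h]
        exact Or.inl (fun e => h e.symm)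
    rw [hsplit]
    have hadd : (ds.map (fun d => ((t.count d : Int)) * g d + (if d = x then g x else 0))).sum
        = (ds.map (fun d => ((t.count d : Int)) * g d)).sum
          + (ds.map (fun d => if d = x then g x else 0)).sum := by
      rw [← List.sum_map_add]
    rw [hadd, ih, sum_indicator_of_nodup ds hnd x (g x)]
    simp [add_comm]

-- ===== VERDICT (by name: the statement is the Claim_ definition above) =====
theorem calculate_disease_score_spec : Claim_equal_calculate_disease_score := by
  intro us ds w _ hnd
  unfold Spec_calculate_disease_score
  simp only [calculate_disease_score, calculate_disease_score_alt]
  set wd := PySem.Dict.ofList w with hwd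
  have hstepA : (fun (acc : Int) (s : String) =>
      if ds.contains s then acc + wd.getD s 1 else acc)
      = (fun acc s => acc + if s ∈ ds then wd.getD s 1 else 0) := by
    funext acc s; by_cases h : s ∈ ds <;> simp [h]
  rw [PySem.Dict.foldl_insert_getD_add_one_eq_counter]
  have hstepB : (fun (score : Int) (symptom : String) =>
      if (PySem.Dict.counter us).contains symptom then
        score + (PySem.Dict.counter us).getD symptom 0 * wd.getD symptom 1
      else score)
      = (fun score symptom => score + ((us.count symptom : Int)) * wd.getD symptom 1) := by
    funext score symptom
    by_cases h : symptom ∈ us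
    · simp [PySem.Dict.contains_counter, h, PySem.Dict.getD_counter]
    · simp [PySem.Dict.contains_counter, h, List.count_eq_zero_of_not_mem h]
  rw [hstepA, hstepB, PySem.List.foldl_add, PySem.List.foldl_add,
    count_mul_sum ds hnd us (fun d => wd.getD d 1)]
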